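-- pv_equiv track=rewrite | github.com/LINSUISHENG034/WorkDataHub | src/work_data_hub/io/loader/insert_builder.py | _prepare_unique_pk_tuples
-- ===== SOURCE A (Python) =====
-- from typing import Any, Dict, List, Optional, Set, Tuple
--
-- def _ensure_list_of_dicts(rows: List[Dict[str, Any]]) -> List[Dict[str, Any]]:
--     """Validate and normalize row data."""
--     if not isinstance(rows, list):
--         raise ValueError("Rows must be a list")
--
--     for i, row in enumerate(rows):
--         if not isinstance(row, dict):
--             raise ValueError(f"Row {i} must be a dictionary")
--
--     return rows
--
-- def _prepare_unique_pk_tuples(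
--     pk_cols: List[str], rows: List[Dict[str, Any]]
-- ) -> List[Tuple[Any, ...]]:
--     """
--     Extract, validate and deduplicate PK tuples from rows.
--
--     Raises ValueError if any required PK is missing.
--     Returns a sorted list of unique PK tuples for deterministic behavior.
--     """
--     rows = _ensure_list_of_dicts(rows)
--     if not rows:
--         return []
--
--     missing_keys = []
--     pk_tuples: List[Tuple[Any, ...]] = []
--
--     for i, row in enumerate(rows):
--         pk_values = []
--         for col in pk_cols:
--             if col not in row or row[col] is None:
--                 missing_keys.append(f"Row {i} missing key {col}")
--             else:
--                 pk_values.append(row[col])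
--         if len(pk_values) == len(pk_cols):
--             pk_tuples.append(tuple(pk_values))
--
--     if missing_keys:
--         raise ValueError("Missing primary key values: " + "; ".join(missing_keys))
--
--     unique_tuples = sorted(list(set(pk_tuples)))
--     return unique_tuples
-- ===== SOURCE B (Python) =====
-- from typing import Any, Dict, List, Tuple
--
--
-- def _ensure_list_of_dicts(rows: List[Dict[str, Any]]) -> List[Dict[str, Any]]:
--     """Validate and normalize row data."""
--     if not isinstance(rows, list):
--         raise ValueError("Rows must be a list")
--     for i, row in enumerate(rows):
--         if not isinstance(row, dict):
--             raise ValueError(f"Row {i} must be a dictionary")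
--     return rows
--
--
-- def _prepare_unique_pk_tuples(
--     pk_cols: List[str], rows: List[Dict[str, Any]]
-- ) -> List[Tuple[Any, ...]]:
--     """Validate, then sort all tuples and drop adjacent duplicates (no hash set)."""
--     rows = _ensure_list_of_dicts(rows)
--     if not rows:
--         return []
--
--     missing = []
--     for i, row in enumerate(rows):
--         for col in pk_cols:
--             if row.get(col) is None:
--                 missing.append(f"Row {i} missing key {col}")
--     if missing:
--         raise ValueError("Missing primary key values: " + "; ".join(missing))
--
--     ts = sorted(tuple(row[col] for col in pk_cols) for row in rows)
--     out: List[Tuple[Any, ...]] = []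
--     last = None
--     for t in ts:
--         if t != last:
--             out.append(t)
--             last = t
--     return out
-- ===== Notes on version B (the rewrite author's own statement) =====
-- stated objective: alternative
-- what changed: A dedupes via a hash set and then sorts the unique tuples; B sorts the full multiset of tuples first and removes duplicates in one adjacent-comparison scan (no set), after a separate validation pass using row.get.
import Mathlib
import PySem

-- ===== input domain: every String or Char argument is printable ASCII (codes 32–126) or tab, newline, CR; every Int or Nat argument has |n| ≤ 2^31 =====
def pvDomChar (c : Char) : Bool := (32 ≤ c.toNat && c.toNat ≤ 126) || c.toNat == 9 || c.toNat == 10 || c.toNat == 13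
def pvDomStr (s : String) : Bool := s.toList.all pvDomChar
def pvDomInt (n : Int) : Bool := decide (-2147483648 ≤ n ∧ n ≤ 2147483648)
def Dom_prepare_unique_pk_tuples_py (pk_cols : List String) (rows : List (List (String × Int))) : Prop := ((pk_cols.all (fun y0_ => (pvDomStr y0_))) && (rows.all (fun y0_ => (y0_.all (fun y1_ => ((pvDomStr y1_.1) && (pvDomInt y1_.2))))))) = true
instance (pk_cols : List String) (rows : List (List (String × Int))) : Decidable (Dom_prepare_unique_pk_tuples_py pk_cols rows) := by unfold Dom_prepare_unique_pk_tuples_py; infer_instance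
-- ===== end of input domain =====

-- B replaces A's hash-set dedup followed by sorting with: sort the full list of tuples,
-- then drop adjacent duplicates in one scan; validation is a separate preceding pass.
-- Equivalence of the RETURN value is proved on inputs where no pk key is missing
-- (on the others both Pythons raise the same ValueError).

-- ===== PORT A =====
-- single fused loop: per row, one inner fold collecting missing messages and pk values
def prepare_unique_pk_tuples_py (pk_cols : List String) (rows : List (List (String × Int))) : List (List Int) :=
  if rows = [] then []
  else
    let st := (PySem.List.enumerate rows).foldl
      (fun (st : List String × List (List Int)) ir =>
        let inner := pk_cols.foldl
          (fun (p : List String × List Int) col =>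
            if (PySem.Dict.mk ir.2).contains col = false then
              (p.1 ++ ["Row " ++ PySem.Int.toStr ir.1 ++ " missing key " ++ col], p.2)
            else
              (p.1, p.2 ++ [((PySem.Dict.mk ir.2).get? col).getD 0]))
          (st.1, ([] : List Int))
        if inner.2.length = pk_cols.length then (inner.1, st.2 ++ [inner.2])
        else (inner.1, st.2))
      (([] : List String), ([] : List (List Int)))
    if st.1 ≠ [] then []  -- Python raises ValueError here; excluded by Pre_
    else PySem.List.sorted (PySem.Set.ofList st.2) (fun t => t) false

-- ===== PORT B =====
-- pass 1: collect missing-key messages; pass 2: sort ALL tuples, then one adjacent-dedup scan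
def prepare_unique_pk_tuples_py_alt (pk_cols : List String) (rows : List (List (String × Int))) : List (List Int) :=
  if rows = [] then []
  else
    let missing := (PySem.List.enumerate rows).foldl
      (fun (ms : List String) ir =>
        pk_cols.foldl
          (fun ms col =>
            if (PySem.Dict.mk ir.2).get? col = none then
              ms ++ ["Row " ++ PySem.Int.toStr ir.1 ++ " missing key " ++ col]
            else ms)
          ms)
      []
    if missing ≠ [] then []  -- Python raises ValueError here; excluded by Pre_
    else
      let ts := PySem.List.sorted
        (rows.map (fun row => pk_cols.map (fun col => ((PySem.Dict.mk row).get? col).getD 0)))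
        (fun t => t) false
      (ts.foldl
        (fun (st : List (List Int) × Option (List Int)) t =>
          if some t ≠ st.2 then (st.1 ++ [t], some t) else st)
        (([] : List (List Int)), (none : Option (List Int)))).1

-- ===== PRECONDITION & SPEC =====
-- Pre_ excludes exactly the inputs where some row lacks a pk column: there both A and B raise ValueError.
def Pre_prepare_unique_pk_tuples_py (pk_cols : List String) (rows : List (List (String × Int))) : Prop :=
  ∀ row ∈ rows, ∀ col ∈ pk_cols, (PySem.Dict.mk row).contains col = true
instance (pk_cols : List String) (rows : List (List (String × Int))) : Decidable (Pre_prepare_unique_pk_tuples_py pk_cols rows) := by unfold Pre_prepare_unique_pk_tuples_py; infer_instance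

def pvWitness_prepare_unique_pk_tuples_py : List String × (List (List (String × Int))) :=
  (["a", "b"], [[("a", 1), ("b", 2)], [("b", 2), ("a", 1), ("c", 9)], [("a", 1), ("b", 2)]])

def Spec_prepare_unique_pk_tuples_py (pk_cols : List String) (rows : List (List (String × Int))) (out : List (List Int)) : Prop := out = prepare_unique_pk_tuples_py_alt pk_cols rows
instance (pk_cols : List String) (rows : List (List (String × Int))) (out : List (List Int)) : Decidable (Spec_prepare_unique_pk_tuples_py pk_cols rows out) := by unfold Spec_prepare_unique_pk_tuples_py; infer_instance

-- ===== CLAIM (what is proved, stated in full; the proofs are below) =====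
def Claim_equal_prepare_unique_pk_tuples_py : Prop := ∀ (pk_cols : List String) (rows : List (List (String × Int))), Dom_prepare_unique_pk_tuples_py pk_cols rows → Pre_prepare_unique_pk_tuples_py pk_cols rows → Spec_prepare_unique_pk_tuples_py pk_cols rows (prepare_unique_pk_tuples_py pk_cols rows)

-- ===== LEMMAS AND PROOFS =====

-- inner fold of A: when every pk col is present, no message is added and the values accumulate
theorem pv_inner_fold (row : List (String × Int)) (pk_cols : List String)
    (h : ∀ col ∈ pk_cols, (PySem.Dict.mk row).contains col = true)
    (i : Int) (ms : List String) (acc : List Int) :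
    pk_cols.foldl
      (fun (p : List String × List Int) col =>
        if (PySem.Dict.mk row).contains col = false then
          (p.1 ++ ["Row " ++ PySem.Int.toStr i ++ " missing key " ++ col], p.2)
        else
          (p.1, p.2 ++ [((PySem.Dict.mk row).get? col).getD 0]))
      (ms, acc)
    = (ms, acc ++ pk_cols.map (fun col => ((PySem.Dict.mk row).get? col).getD 0)) := by
  induction pk_cols generalizing acc with
  | nil => simp [List.foldl]
  | cons c cs ih =>
    have hc := h c (by simp)
    simp only [List.foldl, List.map]
    rw [if_neg (by simp [hc])]
    rw [ih (fun col hm => h col (by simp [hm]))]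
    simp

-- outer fold of A: under Pre_, missing stays [] and the tuples are exactly the per-row map
theorem pv_outer_fold (pk_cols : List String) (rows : List (List (String × Int)))
    (h : ∀ row ∈ rows, ∀ col ∈ pk_cols, (PySem.Dict.mk row).contains col = true)
    (s : Int) (tps : List (List Int)) :
    (PySem.List.enumerate rows s).foldl
      (fun (st : List String × List (List Int)) ir =>
        let inner := pk_cols.foldl
          (fun (p : List String × List Int) col =>
            if (PySem.Dict.mk ir.2).contains col = false then
              (p.1 ++ ["Row " ++ PySem.Int.toStr ir.1 ++ " missing key " ++ col], p.2)
            else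
              (p.1, p.2 ++ [((PySem.Dict.mk ir.2).get? col).getD 0]))
          (st.1, ([] : List Int))
        if inner.2.length = pk_cols.length then (inner.1, st.2 ++ [inner.2])
        else (inner.1, st.2))
      (([] : List String), tps)
    = ([], tps ++ rows.map (fun row => pk_cols.map (fun col => ((PySem.Dict.mk row).get? col).getD 0))) := by
  induction rows generalizing s tps with
  | nil => simp [PySem.List.enumerate_nil]
  | cons r rs ih =>
    rw [PySem.List.enumerate_cons]
    simp only [List.foldl]
    rw [pv_inner_fold r pk_cols (h r (by simp)) s [] []]
    simp only [List.nil_append, List.length_map]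
    rw [if_pos trivial, ih (fun row hm => h row (by simp [hm]))]
    simp

-- B's validation inner pass over pk_cols adds nothing for a complete row
theorem pv_missing_inner (r : List (String × Int)) (pk_cols : List String)
    (h : ∀ col ∈ pk_cols, (PySem.Dict.mk r).contains col = true)
    (s : Int) (ms : List String) :
    pk_cols.foldl
      (fun ms col =>
        if (PySem.Dict.mk r).get? col = none then
          ms ++ ["Row " ++ PySem.Int.toStr s ++ " missing key " ++ col]
        else ms)
      ms = ms := by
  induction pk_cols with
  | nil => simp
  | cons c cs ih =>
    have hc := h c (by simp)
    rw [PySem.Dict.contains_eq_isSome_get?] at hc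
    simp only [List.foldl]
    rw [if_neg (by cases hg : (PySem.Dict.mk r).get? c <;> simp [hg] at hc ⊢)]
    exact ih (fun col hm => h col (by simp [hm]))

-- B's validation pass adds nothing under Pre_
theorem pv_missing_nil (pk_cols : List String) (rows : List (List (String × Int)))
    (h : ∀ row ∈ rows, ∀ col ∈ pk_cols, (PySem.Dict.mk row).contains col = true)
    (s : Int) (ms : List String) :
    (PySem.List.enumerate rows s).foldl
      (fun (ms : List String) ir =>
        pk_cols.foldl
          (fun ms col =>
            if (PySem.Dict.mk ir.2).get? col = none then
              ms ++ ["Row " ++ PySem.Int.toStr ir.1 ++ " missing key " ++ col]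
            else ms)
          ms)
      ms = ms := by
  induction rows generalizing s ms with
  | nil => simp [PySem.List.enumerate_nil]
  | cons r rs ih =>
    rw [PySem.List.enumerate_cons]
    simp only [List.foldl]
    rw [pv_missing_inner r pk_cols (h r (by simp)) s ms]
    exact ih (fun row hm => h row (by simp [hm])) _ _

-- the adjacent-dedup scan of B, from state (acc, some v), on a ≤-sorted suffix all ≥ v:
-- appends a strictly increasing tail whose members are exactly {x ∈ ss | v < x}
theorem pv_scan_go (ss : List (List Int)) (v : List Int) (acc : List (List Int))
    (hs : ss.Pairwise (· ≤ ·)) (hlow : ∀ x ∈ ss, v ≤ x) :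
    ∃ tail : List (List Int),
      (ss.foldl
        (fun (st : List (List Int) × Option (List Int)) t =>
          if some t ≠ st.2 then (st.1 ++ [t], some t) else st)
        (acc, some v)).1 = acc ++ tail
      ∧ tail.Pairwise (· < ·)
      ∧ (∀ x, x ∈ tail ↔ x ∈ ss ∧ v < x) := by
  induction ss generalizing v acc with
  | nil => exact ⟨[], by simp, by simp, by simp⟩
  | cons t rest ih =>
    have hs' := (List.pairwise_cons.mp hs).2
    have hts : ∀ x ∈ rest, t ≤ x := (List.pairwise_cons.mp hs).1
    have hvt : v ≤ t := hlow t (by simp)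
    simp only [List.foldl]
    by_cases hne : t = v
    · rw [if_neg (by simp [hne])]
      obtain ⟨tail, h1, h2, h3⟩ := ih v acc hs' (fun x hx => hlow x (by simp [hx]))
      refine ⟨tail, h1, h2, fun x => ?_⟩
      rw [h3]
      constructor
      · rintro ⟨hx, hv⟩; exact ⟨by simp [hx], hv⟩
      · rintro ⟨hx, hv⟩
        rcases List.mem_cons.mp hx with rfl | hx
        · exact absurd hv (by rw [hne]; exact lt_irrefl v)
        · exact ⟨hx, hv⟩
    · rw [if_pos (by simp [hne])]
      obtain ⟨tail, h1, h2, h3⟩ := ih t (acc ++ [t]) hs' hts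
      refine ⟨t :: tail, by simpa using h1, ?_, fun x => ?_⟩
      · exact List.pairwise_cons.mpr ⟨fun y hy => ((h3 y).mp hy).2, h2⟩
      · constructor
        · intro hx
          rcases List.mem_cons.mp hx with rfl | hx
          · exact ⟨by simp, lt_of_le_of_ne hvt (fun he => hne he.symm)⟩
          · obtain ⟨hr, ht⟩ := (h3 x).mp hx
            exact ⟨by simp [hr], lt_of_le_of_lt hvt ht⟩
        · rintro ⟨hx, hv⟩
          rcases List.mem_cons.mp hx with rfl | hx
          · simp
          · by_cases hxt : x = t
            · simp [hxt]
            · exact List.mem_cons_of_mem _ ((h3 x).mpr ⟨hx, lt_of_le_of_ne (hts x hx) (Ne.symm hxt)⟩)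

-- the full scan on a ≤-sorted list: strictly increasing, same members
theorem pv_scan_spec' (ss : List (List Int)) (hs : ss.Pairwise (· ≤ ·)) :
    ∃ ys : List (List Int),
      (ss.foldl
        (fun (st : List (List Int) × Option (List Int)) t =>
          if some t ≠ st.2 then (st.1 ++ [t], some t) else st)
        ([], none)).1 = ys
      ∧ ys.Pairwise (· < ·)
      ∧ (∀ x, x ∈ ys ↔ x ∈ ss) := by
  cases ss with
  | nil => exact ⟨[], by simp, by simp, by simp⟩
  | cons t rest =>
    have hs' := (List.pairwise_cons.mp hs).2
    have hts : ∀ x ∈ rest, t ≤ x := (List.pairwise_cons.mp hs).1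
    simp only [List.foldl]
    rw [if_pos (by simp)]
    obtain ⟨tail, h1, h2, h3⟩ := pv_scan_go rest t [t] hs' hts
    refine ⟨t :: tail, by simpa using h1,
      List.pairwise_cons.mpr ⟨fun y hy => ((h3 y).mp hy).2, h2⟩, fun x => ?_⟩
    constructor
    · intro hx
      rcases List.mem_cons.mp hx with rfl | hx
      · simp
      · simp [((h3 x).mp hx).1]
    · intro hx
      rcases List.mem_cons.mp hx with rfl | hx
      · simp
      · by_cases hxt : x = t
        · simp [hxt]
        · exact List.mem_cons_of_mem _ ((h3 x).mpr ⟨hx, lt_of_le_of_ne (hts x hx) (Ne.symm hxt)⟩)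

-- core: sorted(set(ts)) equals the adjacent-dedup scan of sorted(ts)
theorem pv_sorted_set_eq_scan (ts : List (List Int)) :
    PySem.List.sorted (PySem.Set.ofList ts) (fun t => t) false
    = ((PySem.List.sorted ts (fun t => t) false).foldl
        (fun (st : List (List Int) × Option (List Int)) t =>
          if some t ≠ st.2 then (st.1 ++ [t], some t) else st)
        ([], none)).1 := by
  have hd : (fun (a b : List Int) => a.decidableLT b)
      = (fun a b => @LinearOrder.toDecidableLT (List Int) List.instLinearOrder a b) := by
    funext a b; exact Subsingleton.elim _ _
  have hcast1 : @PySem.List.sorted (List Int) (List Int) List.instLT (fun a b => a.decidableLT b) (PySem.Set.ofList ts) (fun t => t) false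
      = @PySem.List.sorted (List Int) (List Int) List.instLinearOrder.toLT LinearOrder.toDecidableLT (PySem.Set.ofList ts) (fun t => t) false :=
    congrArg (fun d => @PySem.List.sorted (List Int) (List Int) List.instLT d (PySem.Set.ofList ts) (fun t => t) false) hd
  have hcast2 : @PySem.List.sorted (List Int) (List Int) List.instLT (fun a b => a.decidableLT b) ts (fun t => t) false
      = @PySem.List.sorted (List Int) (List Int) List.instLinearOrder.toLT LinearOrder.toDecidableLT ts (fun t => t) false :=
    congrArg (fun d => @PySem.List.sorted (List Int) (List Int) List.instLT d ts (fun t => t) false) hd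
  rw [hcast1, hcast2]
  obtain ⟨ys, h1, h2, h3⟩ := pv_scan_spec'
    (@PySem.List.sorted (List Int) (List Int) List.instLinearOrder.toLT LinearOrder.toDecidableLT ts (fun t => t) false)
    (PySem.List.sorted_pairwise ts (fun t => t))
  rw [h1]
  refine PySem.List.sorted_eq_of_perm_of_pairwise_lt _ _ _ ?_ h2
  refine (List.perm_ext_iff_of_nodup (h2.imp ne_of_lt) (PySem.Set.nodup_ofList ts)).mpr ?_
  intro a
  rw [h3]
  rw [@PySem.List.mem_sorted (List Int) (List Int) List.instLinearOrder.toLT LinearOrder.toDecidableLT ts (fun t => t) false a]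
  rw [PySem.Set.mem_ofList]

-- ===== VERDICT (by name: the statement is the Claim_ definition above) =====
theorem prepare_unique_pk_tuples_py_spec : Claim_equal_prepare_unique_pk_tuples_py := by
  intro pk_cols rows _ hpre
  unfold Spec_prepare_unique_pk_tuples_py prepare_unique_pk_tuples_py prepare_unique_pk_tuples_py_alt
  by_cases hr : rows = []
  · simp [hr]
  · rw [if_neg hr, if_neg hr]
    rw [pv_outer_fold pk_cols rows hpre 0 []]
    rw [pv_missing_nil pk_cols rows hpre 0 []]
    simp only [List.nil_append]
    rw [if_neg (by simp), if_neg (by simp)]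
    exact pv_sorted_set_eq_scan _
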